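-- pv_equiv track=rewrite | github.com/Miika0320/uo | ITI1120 - Python 2020/test3_300164161/test3_300164161.py | make_teams
-- ===== SOURCE A (Python) =====
-- def make_teams(players, num_teams):
--     '''(list of str, int)->2D list
--     Make num_teams teams out of the players in list players by counting off.
--     Players is a list of players' names and num_teams is the desired number of teams
--     Return a 2D list where each sublist is representing a team.
--     Preconditions: num_teams>= 1
--
--     >>> make_teams(["pele", "maradona", "serena", "venus", "fed", "rafa", "lionel"], 3)
--     [['pele', 'venus', 'lionel'], ['maradona', 'fed'], ['serena', 'rafa']]
--     >>> make_teams(["pele", "maradona", "serena", "venus", "fed", "rafa", "lionel"], 2)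
--     [['pele', 'serena', 'fed', 'lionel'], ['maradona', 'venus', 'rafa']]
--     >>> make_teams(["1", "2", "3", "4", "5", "6", "7", "8", "9"], 3)
--     [['1', '4', '7'], ['2', '5', '8'], ['3', '6', '9']]
--     >>> make_teams(["1", "2", "3", "4", "5", "6", "7", "8", "9"], 1)
--     [['1', '2', '3', '4', '5', '6', '7', '8', '9']]
--     >>> make_teams(["1", "2", "3", "4", "5", "6", "7", "8", "9"], 4)
--     [['1', '5', '9'], ['2', '6'], ['3', '7'], ['4', '8']]
--     >>> make_teams(["1", "2", "3", "4", "5", "6", "7", "8", "9"], 7)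
--     [['1', '8'], ['2', '9'], ['3'], ['4'], ['5'], ['6'], ['7']]
--     >>> make_teams(["1", "2", "3", "4", "5", "6", "7", "8", "9"], 11)
--     [['1'], ['2'], ['3'], ['4'], ['5'], ['6'], ['7'], ['8'], ['9'], [], []]
--     >>> make_teams( [] , 3)
--     [[], [], []]
--     '''
--
--     #YOUR CODE GOES HERE
--     teams = []
--     count = 0
--
--     if len(players) == 0:
--         for j in range(num_teams):
--             teams.append([j])
--         for k in range(len(teams)):
--             teams[k].remove(teams[k][0])
--     else:
--         for i in range(num_teams):
--             teams.append([i])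
--         while len(players)!= 0:
--             if count == (num_teams):
--                 count = 0
--             teams[count].append(players[0])
--             players.remove(players[0])
--             count+=1
--         for k in range(len(teams)):
--             teams[k].remove(teams[k][0])
--     return teams
-- ===== SOURCE B (Python) =====
-- def make_teams(players, num_teams):
--     teams = [[] for _ in range(num_teams)]
--     for i, p in enumerate(players):
--         teams[i % num_teams].append(p)
--     return teams
-- ===== Notes on version B (the rewrite author's own statement) =====
-- stated objective: faster
-- what changed: Replaces A's seeded-team construction, O(n) players.remove(players[0]) shrinking loop and seed-removal cleanup pass with a single enumerate pass appending each player to team i % num_teams.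
import Mathlib
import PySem

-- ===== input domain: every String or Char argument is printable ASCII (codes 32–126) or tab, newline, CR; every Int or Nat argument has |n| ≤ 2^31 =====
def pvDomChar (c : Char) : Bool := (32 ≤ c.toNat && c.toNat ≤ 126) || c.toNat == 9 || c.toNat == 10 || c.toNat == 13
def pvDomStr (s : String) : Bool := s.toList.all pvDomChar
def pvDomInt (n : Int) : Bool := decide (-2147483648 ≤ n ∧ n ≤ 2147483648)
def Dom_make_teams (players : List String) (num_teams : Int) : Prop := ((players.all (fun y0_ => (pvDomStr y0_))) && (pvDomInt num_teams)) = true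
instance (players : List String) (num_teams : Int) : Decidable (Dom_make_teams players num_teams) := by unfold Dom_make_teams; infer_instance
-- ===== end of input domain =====

-- B replaces A's quadratic remove-from-front loop by one pass appending player i to team i % num_teams
-- (measured asymptotically faster). Note: A empties the caller's `players` list in place; B does not —
-- the equivalence proved here is about the return value only.


-- ===== PORT A =====
-- A seeds each team with its int index and removes it at the end; a Python list mixing one int with
-- strings is ported as Int × List String.  `teams[k].remove(teams[k][0])` removes the first occurrence
-- of the int seed (no string compares equal to an int), i.e. it drops the `.1` component: ported as `.2`.
-- `players.remove(players[0])` removes the first occurrence of the head, i.e. drops the head: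
-- ported as structural recursion on the list.
def pvLoopA (nt : Int) : List String → Int → List (Int × List String) → List (Int × List String)
  | [], _, teams => teams
  | p :: rest, count, teams =>
    let c := if count = nt then 0 else count
    pvLoopA nt rest (c + 1) (teams.modify c.toNat (fun t => (t.1, t.2 ++ [p])))

def make_teams (players : List String) (num_teams : Int) : List (List String) :=
  if players.length = 0 then
    let teams := (PySem.List.pyRange 0 num_teams 1).map (fun j => (j, ([] : List String)))
    teams.map (fun t => t.2)
  else
    let teams := (PySem.List.pyRange 0 num_teams 1).map (fun i => (i, ([] : List String)))
    (pvLoopA num_teams players 0 teams).map (fun t => t.2)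

-- ===== PORT B =====
-- enumerate ported as a counter carried through the recursion; teams[i % num_teams].append(p).
def pvLoopB (nt : Int) : List String → Int → List (List String) → List (List String)
  | [], _, ts => ts
  | p :: rest, i, ts => pvLoopB nt rest (i + 1) (ts.modify (PySem.Int.mod i nt).toNat (fun t => t ++ [p]))

def make_teams_alt (players : List String) (num_teams : Int) : List (List String) :=
  pvLoopB num_teams players 0 ((PySem.List.pyRange 0 num_teams 1).map (fun _ => ([] : List String)))

-- ===== PRECONDITION & SPEC =====
-- Pre_ excludes exactly the inputs where A raises IndexError (nonempty players with num_teams ≤ 0: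
-- teams is empty and teams[count] fails); B raises there too.
def Pre_make_teams (players : List String) (num_teams : Int) : Prop :=
  players = [] ∨ 1 ≤ num_teams
instance (players : List String) (num_teams : Int) : Decidable (Pre_make_teams players num_teams) := by
  unfold Pre_make_teams; infer_instance

def pvWitness_make_teams : List String × Int := (["pele", "maradona", "serena"], 2)

def Spec_make_teams (players : List String) (num_teams : Int) (out : List (List String)) : Prop := out = make_teams_alt players num_teams
instance (players : List String) (num_teams : Int) (out : List (List String)) : Decidable (Spec_make_teams players num_teams out) := by unfold Spec_make_teams; infer_instance

-- ===== CLAIM (what is proved, stated in full; the proofs are below) =====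
def Claim_equal_make_teams : Prop := ∀ (players : List String) (num_teams : Int), Dom_make_teams players num_teams → Pre_make_teams players num_teams → Spec_make_teams players num_teams (make_teams players num_teams)

-- ===== LEMMAS AND PROOFS =====

lemma pv_map_snd_modify (teams : List (Int × List String)) (n : Nat) (p : String) :
    (teams.modify n (fun t => (t.1, t.2 ++ [p]))).map (fun t => t.2)
      = (teams.map (fun t => t.2)).modify n (fun t => t ++ [p]) := by
  induction teams generalizing n with
  | nil => simp
  | cons h t ih =>
    cases n with
    | zero => simp [List.modify]
    | succ n => simpa [List.modify_succ_cons] using ih n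

lemma pv_loop_eq (nt : Int) (hnt : 1 ≤ nt) :
    ∀ (ps : List String) (count i : Int) (teams : List (Int × List String)),
      0 ≤ count → count ≤ nt → 0 ≤ i →
      (if count = nt then 0 else count) = PySem.Int.mod i nt →
      (pvLoopA nt ps count teams).map (fun t => t.2)
        = pvLoopB nt ps i (teams.map (fun t => t.2)) := by
  intro ps
  induction ps with
  | nil => intro count i teams _ _ _ _; simp [pvLoopA, pvLoopB]
  | cons p rest ih =>
    intro count i teams hc0 hcn hi hmod
    have hge := PySem.Int.mod_nonneg (a := i) (b := nt) (by omega)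
    have hlt := PySem.Int.mod_lt (a := i) (b := nt) (by omega)
    have hstep : (if PySem.Int.mod i nt + 1 = nt then 0 else PySem.Int.mod i nt + 1)
        = PySem.Int.mod (i + 1) nt := by
      have h1 : PySem.Int.mod i nt = i % nt := PySem.Int.mod_eq_emod_of_pos (by omega)
      have h2 : PySem.Int.mod (i + 1) nt = (i + 1) % nt := PySem.Int.mod_eq_emod_of_pos (by omega)
      have hge' : 0 ≤ i % nt := Int.emod_nonneg i (by omega)
      have hlt' : i % nt < nt := Int.emod_lt_of_pos i (by omega)
      have hsum : (i + 1) % nt = (i % nt + 1) % nt := by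
        rw [Int.add_emod i 1 nt, Int.add_emod (i % nt) 1 nt,
          Int.emod_emod_of_dvd _ (dvd_refl nt)]
      rw [h1, h2, hsum]
      by_cases hcase : i % nt + 1 = nt
      · rw [if_pos hcase, hcase]
        simp
      · rw [if_neg hcase, Int.emod_eq_of_lt (a := i % nt + 1) (b := nt) (by omega) (by omega)]
    simp only [pvLoopA, pvLoopB]
    rw [hmod, ih (PySem.Int.mod i nt + 1) (i + 1) _ (by omega) (by omega) (by omega) hstep,
      pv_map_snd_modify]

-- ===== VERDICT (by name: the statement is the Claim_ definition above) =====
theorem make_teams_spec : Claim_equal_make_teams := by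
  intro players num_teams _ hpre
  unfold Spec_make_teams make_teams make_teams_alt
  cases players with
  | nil => simp [pvLoopB, List.map_map, Function.comp_def, List.map_const']
  | cons p rest =>
    have hnt : 1 ≤ num_teams := by
      rcases hpre with h | h
      · exact absurd h (by simp)
      · exact h
    rw [if_neg (show ¬(p :: rest).length = 0 by simp)]
    rw [pv_loop_eq num_teams hnt (p :: rest) 0 0 _ le_rfl (by omega) le_rfl
        (by rw [PySem.Int.mod_eq_emod_of_pos (by omega)]; simp)]
    simp [List.map_map, Function.comp_def, List.map_const']
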